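-- pv_equiv track=rewrite | github.com/tgrosinger/aenea-grammars | format.py | format_dotify
-- ===== SOURCE A (Python) =====
-- def strip_dragon_info(text):
--     newWords = []
--     words = str(text).split(" ")
--     for word in words:
--         if word.startswith("\\backslash"):
--             word = "\\"  # Backslash requires special handling.
--         elif word.find("\\") > -1:
--             word = word[:word.find("\\")]  # Remove spoken form info.
--         newWords.append(word)
--     return newWords
--
-- def format_dotify(text):
--     newText = ""
--     words = strip_dragon_info(text)
--     for word in words:
--         if newText != "" and newText[-1:].isalnum() and word[-1:].isalnum():
--             word = "." + word  # Adds dashes between normal words.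
--         newText += word
--     return newText
-- ===== SOURCE B (Python) =====
-- def format_dotify(text):
--     # Character-level state machine: one scan over the raw characters (no split,
--     # no per-word list): chars are streamed into `out`; a backslash flips into a
--     # skip state until the next space; at each word boundary the separating dot
--     # is patched in retroactively at the recorded word-start position.
--     s = str(text)
--     out = []          # emitted characters of the result
--     mark = 0          # length of out at the start of the current word
--     prev = ""         # last emitted character before the current word
--     start = True      # at the first character of a word?
--     skip = False      # discarding the rest of the current word?
--     i = 0
--     while i < len(s):
--         c = s[i]
--         if c == " ":
--             if mark < len(out) and prev.isalnum() and out[-1].isalnum():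
--                 out.insert(mark, ".")
--             if out:
--                 prev = out[-1]
--             mark = len(out)
--             start, skip = True, False
--         elif skip:
--             start = False
--         elif c == "\\":
--             if start and s[i:i + 10] == "\\backslash":
--                 out.append("\\")
--             start, skip = False, True
--         else:
--             out.append(c)
--             start = False
--         i += 1
--     if mark < len(out) and prev.isalnum() and out[-1].isalnum():
--         out.insert(mark, ".")
--     return "".join(out)
-- ===== Notes on version B (the rewrite author's own statement) =====
-- stated objective: alternative
-- what changed: A splits the text into words, strips each word into a new list, then folds the list while re-inspecting the accumulated string; B never splits: it is a character-level state machine that streams characters in one scan, a backslash flipping it into a skip-until-space state (with a 10-char lookahead for the literal '\backslash'), and the separating dot is patched in retroactively at the recorded word-start mark at each boundary.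
import Mathlib
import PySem

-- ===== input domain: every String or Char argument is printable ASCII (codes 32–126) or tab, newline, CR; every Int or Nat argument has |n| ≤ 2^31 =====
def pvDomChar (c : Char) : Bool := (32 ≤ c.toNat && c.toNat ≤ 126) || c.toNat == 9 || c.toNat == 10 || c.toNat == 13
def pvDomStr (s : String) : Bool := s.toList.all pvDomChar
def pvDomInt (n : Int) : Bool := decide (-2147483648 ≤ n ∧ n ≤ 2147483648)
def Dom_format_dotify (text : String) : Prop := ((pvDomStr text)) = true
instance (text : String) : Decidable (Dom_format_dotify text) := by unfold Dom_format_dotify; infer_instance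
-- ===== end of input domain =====

-- B replaces A's split-into-words/strip-list/fold pipeline by a single character-level
-- state machine over the raw string that patches the separating dot in retroactively at
-- each word boundary; objective: alternative decomposition, not speed.

-- ===== PORT A =====
-- helper of A: strip_dragon_info's per-word transformation
def pvStripWord (word : List Char) : List Char :=
  if PySem.Chars.startswith word ("\\backslash".toList) then ['\\']
  else if PySem.Chars.find word ['\\'] > -1 then
    PySem.Chars.slice word none (some (PySem.Chars.find word ['\\']))
  else word

def pvStripDragonInfo (text : List Char) : List (List Char) :=
  (PySem.Chars.splitOn text [' ']).foldl (fun newWords word => newWords ++ [pvStripWord word]) []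

def format_dotify (text : String) : String :=
  String.ofList ((pvStripDragonInfo text.toList).foldl
    (fun newText word =>
      newText ++
        (if !newText.isEmpty
            && PySem.Chars.strIsalnum (PySem.Chars.slice newText (some (-1)) none)
            && PySem.Chars.strIsalnum (PySem.Chars.slice word (some (-1)) none)
         then '.' :: word else word)) [])

-- ===== PORT B =====
-- `out.insert(mark, ".")` with mark ≤ len(out) is exactly take/++/drop; guarded by mark < len(out)
def pvClose (out : List Char) (mark : Nat) (prev : List Char) : List Char :=
  if mark < out.length
      ∧ PySem.Chars.strIsalnum prev = true
      ∧ PySem.Chars.strIsalnum (PySem.Chars.slice out (some (-1)) none) = true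
  then out.take mark ++ '.' :: out.drop mark else out

-- the while-loop over s with index i, transcribed as structural recursion on the yet-unread
-- suffix s[i:]; the lookahead s[i:i+10] is exactly (c :: rest).take 10
def pvRun : List Char → List Char → Nat → List Char → Bool → Bool → List Char
  | [], out, mark, prev, _, _ => pvClose out mark prev
  | c :: rest, out, mark, prev, start, skip =>
      if c = ' ' then
        let out' := pvClose out mark prev
        let prev' := if out'.isEmpty then prev else PySem.Chars.slice out' (some (-1)) none
        pvRun rest out' out'.length prev' true false
      else if skip then
        pvRun rest out mark prev false skip
      else if c = '\\' then
        pvRun rest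
          (if start = true ∧ List.take 10 (c :: rest) = "\\backslash".toList
           then out ++ ['\\'] else out) mark prev false true
      else
        pvRun rest (out ++ [c]) mark prev false false

def format_dotify_alt (text : String) : String :=
  String.ofList (pvRun text.toList [] 0 [] true false)

-- ===== PRECONDITION & SPEC =====
def Spec_format_dotify (text : String) (out : String) : Prop := out = format_dotify_alt text
instance (text : String) (out : String) : Decidable (Spec_format_dotify text out) := by unfold Spec_format_dotify; infer_instance

-- ===== CLAIM (what is proved, stated in full; the proofs are below) =====
def Claim_equal_format_dotify : Prop := ∀ (text : String), Dom_format_dotify text → Spec_format_dotify text (format_dotify text)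

-- ===== LEMMAS AND PROOFS =====

-- last-character slice, abbreviated
def pvLast (out : List Char) : List Char := PySem.Chars.slice out (some (-1)) none

-- structural model of text.split(" "): (head word, remaining words)
def pvSplitP : List Char → List Char × List (List Char)
  | [] => ([], [])
  | c :: r =>
      if c = ' ' then ([], (pvSplitP r).1 :: (pvSplitP r).2)
      else (c :: (pvSplitP r).1, (pvSplitP r).2)

-- " ".join
def pvJoinW : List (List Char) → List Char
  | [] => []
  | [w] => w
  | w :: w' :: t => w ++ ' ' :: pvJoinW (w' :: t)

-- what the machine emits for one space-free word
def pvStripB (w : List Char) : List Char :=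
  if w.take 10 = "\\backslash".toList then ['\\'] else w.takeWhile (· ≠ '\\')

theorem pvLast_nil : pvLast [] = [] := rfl

theorem pvLast_append (acc p : List Char) (hp : p ≠ []) : pvLast (acc ++ p) = pvLast p := by
  simp only [pvLast, PySem.Chars.slice, PySem.List.slice_from_neg_one]
  have h1 : (acc ++ p).length - 1 = acc.length + (p.length - 1) := by
    have := List.length_pos_iff.mpr hp; simp [List.length_append]; omega
  rw [h1, List.drop_append]
  simp [List.drop_eq_nil_of_le]

theorem strIsalnum_nil : PySem.Chars.strIsalnum ([] : List Char) = false := by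
  simp [PySem.Chars.strIsalnum]

-- ---- splitOn [' '] equals the structural pvSplitP ----

theorem go_nil (fuel : Nat) (cur : List Char) (acc : List (List Char)) :
    PySem.Chars.splitOn.go [' '] (fuel + 1) [] cur acc = (cur.reverse :: acc).reverse := by
  simp [PySem.Chars.splitOn.go]

theorem go_space (fuel : Nat) (rest cur : List Char) (acc : List (List Char)) :
    PySem.Chars.splitOn.go [' '] (fuel + 1) (' ' :: rest) cur acc
      = PySem.Chars.splitOn.go [' '] fuel rest [] (cur.reverse :: acc) := by
  rw [PySem.Chars.splitOn.go]
  simp [List.isPrefixOf]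

theorem go_char (fuel : Nat) (c : Char) (rest cur : List Char) (acc : List (List Char))
    (h : c ≠ ' ') :
    PySem.Chars.splitOn.go [' '] (fuel + 1) (c :: rest) cur acc
      = PySem.Chars.splitOn.go [' '] fuel rest (c :: cur) acc := by
  rw [PySem.Chars.splitOn.go]
  simp only [List.isPrefixOf, Bool.and_true]
  rw [if_neg]
  simp only [beq_iff_eq]
  intro hc; exact h hc.symm

theorem go_split (l : List Char) : ∀ (fuel : Nat), l.length < fuel → ∀ (cur : List Char)
    (acc : List (List Char)),
    PySem.Chars.splitOn.go [' '] fuel l cur acc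
      = acc.reverse ++ (cur.reverse ++ (pvSplitP l).1) :: (pvSplitP l).2 := by
  induction l with
  | nil =>
    intro fuel hf cur acc
    obtain ⟨f, rfl⟩ : ∃ f, fuel = f + 1 := ⟨fuel - 1, by omega⟩
    rw [go_nil]; simp [pvSplitP]
  | cons c r ih =>
    intro fuel hf cur acc
    obtain ⟨f, rfl⟩ : ∃ f, fuel = f + 1 := ⟨fuel - 1, by omega⟩
    have hfr : r.length < f := by simp at hf; omega
    by_cases hc : c = ' '
    · subst hc
      rw [go_space, ih f hfr [] (cur.reverse :: acc)]
      simp [pvSplitP]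
    · rw [go_char _ _ _ _ _ hc, ih f hfr (c :: cur) acc]
      simp [pvSplitP, hc]

theorem splitOn_eq (cs : List Char) :
    PySem.Chars.splitOn cs [' '] = (pvSplitP cs).1 :: (pvSplitP cs).2 := by
  show PySem.Chars.splitOn.go [' '] (cs.length + 1) cs [] [] = _
  rw [go_split cs (cs.length + 1) (by omega) [] []]
  simp

theorem pvJoinW_cons_head (c : Char) (h : List Char) (t : List (List Char)) :
    pvJoinW ((c :: h) :: t) = c :: pvJoinW (h :: t) := by
  cases t <;> simp [pvJoinW]

theorem pvJoinW_splitP (cs : List Char) :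
    pvJoinW ((pvSplitP cs).1 :: (pvSplitP cs).2) = cs := by
  induction cs with
  | nil => simp [pvSplitP, pvJoinW]
  | cons c r ih =>
    by_cases hc : c = ' '
    · subst hc; simp only [pvSplitP]
      simpa [pvJoinW] using ih
    · simp only [pvSplitP, if_neg hc]
      rw [pvJoinW_cons_head, ih]

theorem pvSplitP_no_space (cs : List Char) :
    (' ' ∉ (pvSplitP cs).1) ∧ ∀ w ∈ (pvSplitP cs).2, ' ' ∉ w := by
  induction cs with
  | nil => simp [pvSplitP]
  | cons c r ih =>
    by_cases hc : c = ' '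
    · subst hc; simp only [pvSplitP]
      exact ⟨by simp, by simpa using ih⟩
    · simp only [pvSplitP, if_neg hc]
      refine ⟨?_, ih.2⟩
      simp only [List.mem_cons, not_or]
      exact ⟨fun h => hc h.symm, ih.1⟩

-- ---- A's per-word strip equals the machine's per-word emission ----

theorem singleton_prefix_iff (l : List Char) (a : Char) : [a] <+: l ↔ l.head? = some a := by
  cases l with
  | nil => simp
  | cons b t => simp [List.cons_prefix_cons, eq_comm]

theorem pvStripWord_eq (w : List Char) : pvStripWord w = pvStripB w := by
  unfold pvStripWord pvStripB
  have hsw : PySem.Chars.startswith w ("\\backslash".toList) = true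
      ↔ w.take 10 = "\\backslash".toList := by
    rw [PySem.Chars.startswith_iff, List.prefix_iff_eq_take]
    constructor <;> (intro h; exact h.symm)
  by_cases hpat : w.take 10 = "\\backslash".toList
  · rw [if_pos (hsw.mpr hpat), if_pos hpat]
  · rw [if_neg (fun h => hpat (hsw.mp h)), if_neg hpat]
    by_cases hmem : '\\' ∈ w
    · have h0 : (0:Int) ≤ PySem.Chars.find w ['\\'] := by
        rw [PySem.Chars.find_nonneg_iff]
        exact (List.singleton_infix_iff '\\' w).mpr hmem
      rw [if_pos (by omega)]
      obtain ⟨hpre, hmin⟩ := PySem.Chars.find_spec h0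
      set k := (PySem.Chars.find w ['\\']).toNat with hk
      have hgetk : w[k]? = some '\\' := by
        rw [← List.head?_drop]
        exact (singleton_prefix_iff _ _).mp hpre
      obtain ⟨hklt, hgetval⟩ := List.getElem?_eq_some_iff.mp hgetk
      rw [PySem.Chars.slice_eq_listSlice w none (some (PySem.Chars.find w ['\\'])),
        PySem.List.slice_to w h0]
      rw [List.takeWhile_eq_take_findIdx_not]
      congr 1
      symm
      rw [List.findIdx_eq hklt]
      refine ⟨by simp [hgetval], ?_⟩
      intro j hj
      have hnp := hmin j hj
      rw [singleton_prefix_iff, List.head?_drop] at hnp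
      have hjlt : j < w.length := by omega
      simp only [List.getElem?_eq_getElem hjlt] at hnp
      simp only [Bool.not_eq_false', decide_eq_true_eq]
      intro hc; exact hnp (by rw [hc])
    · have hne : PySem.Chars.find w ['\\'] = -1 := by
        rw [PySem.Chars.find_eq_neg_one_iff]
        intro hinf
        exact hmem ((List.singleton_infix_iff '\\' w).mp hinf)
      rw [hne, if_neg (by omega)]
      exact (List.takeWhile_eq_self_iff.mpr (by
        intro x hx
        simp only [decide_eq_true_eq]
        intro hc; subst hc; exact hmem hx)).symm

-- ---- the close step equals A's fold step ----

theorem pvClose_nil (out : List Char) : pvClose out out.length (pvLast out) = out := by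
  unfold pvClose
  rw [if_neg]; intro h; omega

theorem pvClose_step (out sw : List Char) :
    pvClose (out ++ sw) out.length (pvLast out)
      = out ++ (if !out.isEmpty
            && PySem.Chars.strIsalnum (pvLast out)
            && PySem.Chars.strIsalnum (pvLast sw)
         then '.' :: sw else sw) := by
  unfold pvClose
  rcases eq_or_ne sw [] with rfl | hsw
  · have h1 : PySem.Chars.strIsalnum (pvLast ([] : List Char)) = false := strIsalnum_nil
    rw [if_neg (by simp only [List.append_nil]; intro hh; omega),
      if_neg (by simp [h1]), List.append_nil]
  · have hlen : out.length < (out ++ sw).length := by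
      have := List.length_pos_iff.mpr hsw; simp [List.length_append]; omega
    rw [show PySem.Chars.slice (out ++ sw) (some (-1)) none = pvLast sw from pvLast_append out sw hsw]
    rcases eq_or_ne out [] with rfl | hout
    · rw [if_neg (by simp [pvLast_nil, strIsalnum_nil]), if_neg (by simp)]
    · have hie : out.isEmpty = false := by simpa [List.isEmpty_iff] using hout
      by_cases hc : PySem.Chars.strIsalnum (pvLast out) = true
          ∧ PySem.Chars.strIsalnum (pvLast sw) = true
      · rw [if_pos ⟨hlen, hc.1, hc.2⟩, if_pos (by simp [hie, hc.1, hc.2]),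
          List.take_left, List.drop_left]
      · rw [if_neg (fun h => hc ⟨h.2.1, h.2.2⟩), if_neg (by
          simp only [hie, Bool.not_false, Bool.true_and, Bool.and_eq_true]
          exact hc)]

-- ---- running the machine over one word ----

theorem pvRun_boundary_congr (rest out : List Char) (mark : Nat) (prev : List Char)
    (a b a' b' : Bool) (hb : rest = [] ∨ ∃ r, rest = ' ' :: r) :
    pvRun rest out mark prev a b = pvRun rest out mark prev a' b' := by
  rcases hb with rfl | ⟨r, rfl⟩
  · rfl
  · simp [pvRun]

theorem pvRun_step_space (rest out : List Char) (mark : Nat) (prev : List Char)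
    (start skip : Bool) :
    pvRun (' ' :: rest) out mark prev start skip
      = pvRun rest (pvClose out mark prev) (pvClose out mark prev).length
          (if (pvClose out mark prev).isEmpty then prev
           else PySem.Chars.slice (pvClose out mark prev) (some (-1)) none) true false := by
  simp [pvRun]

theorem pvRun_step_skip (c : Char) (rest out : List Char) (mark : Nat) (prev : List Char)
    (start : Bool) (h : c ≠ ' ') :
    pvRun (c :: rest) out mark prev start true = pvRun rest out mark prev false true := by
  simp [pvRun, h]

theorem pvRun_step_bs (rest out : List Char) (mark : Nat) (prev : List Char) (start : Bool) :
    pvRun ('\\' :: rest) out mark prev start false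
      = pvRun rest
          (if start = true ∧ List.take 10 ('\\' :: rest) = "\\backslash".toList
           then out ++ ['\\'] else out) mark prev false true := by
  simp [pvRun]

theorem pvRun_step_copy (c : Char) (rest out : List Char) (mark : Nat) (prev : List Char)
    (start : Bool) (h1 : c ≠ ' ') (h2 : c ≠ '\\') :
    pvRun (c :: rest) out mark prev start false
      = pvRun rest (out ++ [c]) mark prev false false := by
  simp [pvRun, h1, h2]

theorem pvRun_skip (w : List Char) : ∀ (rest out : List Char) (mark : Nat) (prev : List Char)
    (st : Bool), ' ' ∉ w → (rest = [] ∨ ∃ r, rest = ' ' :: r) →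
    pvRun (w ++ rest) out mark prev st true = pvRun rest out mark prev true false := by
  induction w with
  | nil => intro rest out mark prev st _ hb; exact pvRun_boundary_congr rest out mark prev st true true false hb
  | cons c r ih =>
    intro rest out mark prev st h hb
    have hc : c ≠ ' ' := fun hh => h (by simp [hh])
    rw [List.cons_append, pvRun_step_skip c (r ++ rest) out mark prev st hc]
    exact ih rest out mark prev false (fun hh => h (by simp [hh])) hb

theorem pvRun_copy (w : List Char) : ∀ (rest out : List Char) (mark : Nat) (prev : List Char),
    ' ' ∉ w → (rest = [] ∨ ∃ r, rest = ' ' :: r) →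
    pvRun (w ++ rest) out mark prev false false
      = pvRun rest (out ++ w.takeWhile (· ≠ '\\')) mark prev true false := by
  induction w with
  | nil =>
    intro rest out mark prev _ hb
    simpa using pvRun_boundary_congr rest out mark prev false false true false hb
  | cons c r ih =>
    intro rest out mark prev h hb
    have hc : c ≠ ' ' := fun hh => h (by simp [hh])
    have hr : ' ' ∉ r := fun hh => h (by simp [hh])
    by_cases hbs : c = '\\'
    · subst hbs
      rw [List.cons_append, pvRun_step_bs (r ++ rest) out mark prev false,
        if_neg (by simp)]
      rw [pvRun_skip r rest out mark prev false hr hb]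
      simp
    · rw [List.cons_append, pvRun_step_copy c (r ++ rest) out mark prev false hc hbs]
      rw [ih rest (out ++ [c]) mark prev hr hb]
      have : (c :: r).takeWhile (· ≠ '\\') = c :: r.takeWhile (· ≠ '\\') := by
        simp [hbs]
      rw [this]; simp

theorem take10_boundary (r rest : List Char)
    (hb : rest = [] ∨ ∃ r₂, rest = ' ' :: r₂) :
    ((('\\' :: (r ++ rest)).take 10 = "\\backslash".toList)
      ↔ (('\\' :: r).take 10 = "\\backslash".toList)) := by
  rcases hb with rfl | ⟨r₂, rfl⟩
  · rw [List.append_nil]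
  · rw [show ('\\' :: (r ++ ' ' :: r₂)) = ('\\' :: r) ++ (' ' :: r₂) from by simp,
      List.take_append]
    by_cases hlen : 9 ≤ r.length
    · have h0 : 10 - ('\\' :: r).length = 0 := by simp; omega
      rw [h0]
      simp
    · have hlt : ('\\' :: r).length ≤ 10 := by simp; omega
      rw [List.take_of_length_le hlt]
      constructor
      · intro h
        exfalso
        have hm : ' ' ∈ ('\\' :: r) ++ (' ' :: r₂).take (10 - ('\\' :: r).length) := by
          have hne : 10 - ('\\' :: r).length ≠ 0 := by simp; omega
          rcases Nat.exists_eq_succ_of_ne_zero hne with ⟨m, hm'⟩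
          rw [hm', List.take_succ_cons]
          simp
        rw [h] at hm
        revert hm; decide
      · intro h
        exfalso
        have hl := congrArg List.length h
        simp at hl
        omega

theorem pvRun_word (w rest out : List Char) (mark : Nat) (prev : List Char)
    (h : ' ' ∉ w) (hb : rest = [] ∨ ∃ r, rest = ' ' :: r) :
    pvRun (w ++ rest) out mark prev true false
      = pvRun rest (out ++ pvStripB w) mark prev true false := by
  cases w with
  | nil =>
    have h0 : pvStripB [] = [] := by decide
    rw [h0, List.nil_append, List.append_nil]
  | cons c r =>
    have hc : c ≠ ' ' := fun hh => h (by simp [hh])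
    have hr : ' ' ∉ r := fun hh => h (by simp [hh])
    by_cases hbs : c = '\\'
    · subst hbs
      rw [List.cons_append, pvRun_step_bs (r ++ rest) out mark prev true]
      by_cases hpat : ('\\' :: r).take 10 = "\\backslash".toList
      · rw [if_pos ⟨rfl, (take10_boundary r rest hb).mpr hpat⟩]
        rw [pvRun_skip r rest (out ++ ['\\']) mark prev false hr hb]
        rw [show pvStripB ('\\' :: r) = ['\\'] from by rw [pvStripB, if_pos hpat]]
      · rw [if_neg (fun hh => hpat ((take10_boundary r rest hb).mp hh.2))]
        rw [pvRun_skip r rest out mark prev false hr hb]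
        rw [show pvStripB ('\\' :: r) = [] from by
          rw [pvStripB, if_neg hpat]; simp]
        simp
    · rw [List.cons_append, pvRun_step_copy c (r ++ rest) out mark prev true hc hbs]
      rw [pvRun_copy r rest (out ++ [c]) mark prev hr hb]
      rw [show pvStripB (c :: r) = c :: r.takeWhile (· ≠ '\\') from by
        rw [pvStripB, if_neg (by
          intro hh
          have : c = '\\' := by
            have := congrArg (List.head? ·) hh
            simpa [List.take_cons] using this
          exact hbs this)]
        simp [hbs]]
      simp

-- ---- the machine over a whole word list equals A's fold ----

theorem pvRun_words (ws : List (List Char)) : ∀ (out : List Char),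
    (∀ w ∈ ws, ' ' ∉ w) →
    pvRun (pvJoinW ws) out out.length (pvLast out) true false
      = ws.foldl (fun newText word =>
          newText ++
            (if !newText.isEmpty
                && PySem.Chars.strIsalnum (PySem.Chars.slice newText (some (-1)) none)
                && PySem.Chars.strIsalnum (PySem.Chars.slice (pvStripWord word) (some (-1)) none)
             then '.' :: pvStripWord word else pvStripWord word)) out := by
  induction ws with
  | nil =>
    intro out _
    show pvClose out out.length (pvLast out) = out
    exact pvClose_nil out
  | cons w ws ih =>
    intro out hws
    have hw : ' ' ∉ w := hws w (by simp)
    have hws' : ∀ w' ∈ ws, ' ' ∉ w' := fun w' hw' => hws w' (by simp [hw'])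
    cases ws with
    | nil =>
      show pvRun (pvJoinW [w]) out out.length (pvLast out) true false = _
      rw [show pvJoinW [w] = w ++ [] from by simp [pvJoinW]]
      rw [pvRun_word w [] out out.length (pvLast out) hw (Or.inl rfl)]
      show pvClose (out ++ pvStripB w) out.length (pvLast out) = _
      rw [← pvStripWord_eq, pvClose_step]
      simp [pvLast]
    | cons w' t =>
      rw [show pvJoinW (w :: w' :: t) = w ++ ' ' :: pvJoinW (w' :: t) from rfl]
      rw [pvRun_word w (' ' :: pvJoinW (w' :: t)) out out.length (pvLast out) hw
        (Or.inr ⟨_, rfl⟩)]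
      rw [pvRun_step_space]
      rw [← pvStripWord_eq, pvClose_step]
      set out₂ := out ++ (if !out.isEmpty
            && PySem.Chars.strIsalnum (pvLast out)
            && PySem.Chars.strIsalnum (pvLast (pvStripWord w))
         then '.' :: pvStripWord w else pvStripWord w) with hout₂
      have hprev : (if out₂.isEmpty then pvLast out
          else PySem.Chars.slice out₂ (some (-1)) none) = pvLast out₂ := by
        by_cases he : out₂.isEmpty
        · have h2 : out₂ = [] := List.isEmpty_iff.mp he
          have h3 : out = [] := (List.append_eq_nil_iff.mp h2).1
          rw [if_pos he, h2, h3]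
        · rw [if_neg he]; rfl
      rw [hprev]
      rw [ih out₂ hws']
      simp only [List.foldl_cons, hout₂, pvLast]
      rfl

-- ===== VERDICT (by name: the statement is the Claim_ definition above) =====
theorem format_dotify_spec : Claim_equal_format_dotify := by
  intro text _
  unfold Spec_format_dotify format_dotify format_dotify_alt pvStripDragonInfo
  rw [PySem.List.foldl_append_singleton_eq_map, splitOn_eq]
  simp only [List.nil_append, List.foldl_map]
  have hcs : text.toList = pvJoinW ((pvSplitP text.toList).1 :: (pvSplitP text.toList).2) :=
    (pvJoinW_splitP text.toList).symm
  have hws : ∀ w ∈ (pvSplitP text.toList).1 :: (pvSplitP text.toList).2, ' ' ∉ w := by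
    intro w hw
    rcases List.mem_cons.mp hw with rfl | hw'
    · exact (pvSplitP_no_space text.toList).1
    · exact (pvSplitP_no_space text.toList).2 w hw'
  have key : pvRun text.toList [] 0 [] true false
      = ((pvSplitP text.toList).1 :: (pvSplitP text.toList).2).foldl
          (fun newText word =>
            newText ++
              (if !newText.isEmpty
                  && PySem.Chars.strIsalnum (PySem.Chars.slice newText (some (-1)) none)
                  && PySem.Chars.strIsalnum (PySem.Chars.slice (pvStripWord word) (some (-1)) none)
               then '.' :: pvStripWord word else pvStripWord word)) [] := by
    conv_lhs => rw [hcs]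
    exact pvRun_words _ [] hws
  rw [key]
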